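-- pv_equiv track=rewrite | github.com/se2p/artifact-pynguin-ssbse2020 | data/generate_slurm_job_scripts.py | _exclude_modules
-- ===== SOURCE A (Python) =====
-- from typing import List, Dict, Union, Any, Set
--
-- def _exclude_modules(
--     modules: Dict[str, Set[str]], excludes: List[Dict[str, str]]
-- ) -> Dict[str, Set[str]]:
--     excludes_map = {
--         mapping["project"]: mapping["modules"] for mapping in excludes
--     }
--     result = {}
--     for project, module_names in modules.items():
--         if project in excludes_map:
--             result[project] = {e for e in module_names if e not in excludes_map[project]}
--         else:
--             result[project] = module_names
--     return result
-- ===== SOURCE B (Python) =====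
-- def _exclude_modules(modules, excludes):
--     result = dict(modules)
--     for mapping in excludes:
--         project = mapping["project"]
--         if project in modules:
--             result[project] = {
--                 e for e in modules[project] if e not in mapping["modules"]
--             }
--     return result
-- ===== Notes on version B (the rewrite author's own statement) =====
-- stated objective: simpler
-- what changed: B shallow-copies the modules dict and iterates over the excludes list, overwriting only the entries of excluded projects from the original modules, instead of A's building an excludes map first and then re-inserting every project while iterating over modules.
import Mathlib
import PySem

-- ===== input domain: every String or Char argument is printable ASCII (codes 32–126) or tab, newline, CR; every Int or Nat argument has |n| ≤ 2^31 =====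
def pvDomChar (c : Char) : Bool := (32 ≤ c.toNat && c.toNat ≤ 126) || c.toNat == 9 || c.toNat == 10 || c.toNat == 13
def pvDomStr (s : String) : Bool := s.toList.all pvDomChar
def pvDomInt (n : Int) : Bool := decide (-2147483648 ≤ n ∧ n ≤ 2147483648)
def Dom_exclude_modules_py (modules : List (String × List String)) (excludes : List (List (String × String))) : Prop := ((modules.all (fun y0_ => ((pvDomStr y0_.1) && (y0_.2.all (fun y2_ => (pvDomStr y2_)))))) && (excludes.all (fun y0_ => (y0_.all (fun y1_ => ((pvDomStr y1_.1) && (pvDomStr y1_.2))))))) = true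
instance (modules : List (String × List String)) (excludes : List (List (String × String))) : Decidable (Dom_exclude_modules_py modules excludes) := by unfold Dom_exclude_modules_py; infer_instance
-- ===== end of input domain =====

-- B changes the decomposition: instead of building an excludes map and re-inserting every project,
-- it copies the modules dict and loops over the excludes list, overwriting only excluded projects
-- (objective: simpler; same cost).

-- ===== PORT A =====
-- dict values of type Set[str] are modelled as the list of distinct elements; the set comprehension
-- becomes a filter (outputs are compared as finite sets).  A missing "project"/"modules" key raises
-- KeyError in Python and is excluded by Pre_; the `getD ""` default is unreachable under Pre_.
def exclude_modules_py (modules : List (String × List String)) (excludes : List (List (String × String))) : List (String × List String) :=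
  let excludes_map : PySem.Dict String String :=
    excludes.foldl (fun d mapping =>
      d.insert ((PySem.Dict.mk mapping).getD "project" "")
               ((PySem.Dict.mk mapping).getD "modules" "")) PySem.Dict.empty
  (modules.foldl (fun r pm =>
      match excludes_map.get? pm.1 with
      | some ex => r.insert pm.1 (pm.2.filter (fun e => !(PySem.Str.isIn e ex)))
      | none    => r.insert pm.1 pm.2) PySem.Dict.empty).items

-- ===== PORT B =====
-- result = dict(modules); for each mapping overwrite the entry of its project (if the project
-- exists), filtering the ORIGINAL modules[project]; `e not in mapping["modules"]` is Python's
-- substring test on the string value, PySem.Str.isIn.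
def exclude_modules_py_alt (modules : List (String × List String)) (excludes : List (List (String × String))) : List (String × List String) :=
  (excludes.foldl (fun r mapping =>
      match (PySem.Dict.mk modules).get? ((PySem.Dict.mk mapping).getD "project" "") with
      | some ms => r.insert ((PySem.Dict.mk mapping).getD "project" "")
          (ms.filter (fun e => !(PySem.Str.isIn e ((PySem.Dict.mk mapping).getD "modules" ""))))
      | none    => r) (PySem.Dict.mk modules)).items

-- ===== PRECONDITION & SPEC =====
-- Pre_ requires every exclude mapping to carry the "project" and "modules" keys (Python raises
-- KeyError otherwise) and the modules association list to have distinct keys — duplicate keys are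
-- unrepresentable in the Python dict A receives, so this excludes nothing of A's domain.
def Pre_exclude_modules_py (modules : List (String × List String)) (excludes : List (List (String × String))) : Prop :=
  (modules.map Prod.fst).Nodup ∧
  ∀ mapping ∈ excludes, ((PySem.Dict.mk mapping).get? "project").isSome
    ∧ ((PySem.Dict.mk mapping).get? "modules").isSome
instance (modules : List (String × List String)) (excludes : List (List (String × String))) : Decidable (Pre_exclude_modules_py modules excludes) := by unfold Pre_exclude_modules_py; infer_instance

def pvWitness_exclude_modules_py : (List (String × List String)) × (List (List (String × String))) :=
  ([("proj", ["m1", "m2"])], [[("project", "proj"), ("modules", "m1")]])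

def Spec_exclude_modules_py (modules : List (String × List String)) (excludes : List (List (String × String))) (out : List (String × List String)) : Prop := out = exclude_modules_py_alt modules excludes
instance (modules : List (String × List String)) (excludes : List (List (String × String))) (out : List (String × List String)) : Decidable (Spec_exclude_modules_py modules excludes out) := by unfold Spec_exclude_modules_py; infer_instance

-- ===== CLAIM (what is proved, stated in full; the proofs are below) =====
def Claim_equal_exclude_modules_py : Prop := ∀ (modules : List (String × List String)) (excludes : List (List (String × String))), Dom_exclude_modules_py modules excludes → Pre_exclude_modules_py modules excludes → Spec_exclude_modules_py modules excludes (exclude_modules_py modules excludes)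


-- ===== LEMMAS AND PROOFS =====

-- value of project pm under the excludes map em (the common characterisation of both results)
def pvVal (em : PySem.Dict String String) (pm : String × List String) : String × List String :=
  match em.get? pm.1 with
  | some ex => (pm.1, pm.2.filter (fun e => !(PySem.Str.isIn e ex)))
  | none    => pm

theorem pvVal_fst (em : PySem.Dict String String) (pm : String × List String) : (pvVal em pm).1 = pm.1 := by
  unfold pvVal; cases em.get? pm.1 <;> rfl

theorem pvVal_empty (pm : String × List String) : pvVal PySem.Dict.empty pm = pm := by
  unfold pvVal; simp [pysem]

-- A's result is modules mapped through the final excludes map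
theorem pvA_char (modules : List (String × List String)) (em : PySem.Dict String String)
    (h : (modules.map Prod.fst).Nodup) :
    (modules.foldl (fun r pm =>
      match em.get? pm.1 with
      | some ex => r.insert pm.1 (pm.2.filter (fun e => !(PySem.Str.isIn e ex)))
      | none    => r.insert pm.1 pm.2) PySem.Dict.empty).items
    = modules.map (pvVal em) := by
  have hfn : (fun (r : PySem.Dict String (List String)) (pm : String × List String) =>
      match em.get? pm.1 with
      | some ex => r.insert pm.1 (pm.2.filter (fun e => !(PySem.Str.isIn e ex)))
      | none    => r.insert pm.1 pm.2)
      = fun r pm => r.insert pm.1 (pvVal em pm).2 := by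
    funext r pm; unfold pvVal; cases em.get? pm.1 <;> rfl
  rw [hfn, PySem.Dict.items_foldl_insert_fresh modules (fun pm => pm.1)
        (fun pm => (pvVal em pm).2) PySem.Dict.empty
        (fun a _ => PySem.Dict.contains_empty _) h]
  show [] ++ _ = _
  rw [List.nil_append]
  exact List.map_congr_left (fun pm _ => by
    have := pvVal_fst em pm
    exact Prod.ext this.symm rfl)

-- B's loop invariant: starting from modules mapped through em, processing the excludes list
-- updates the map to the extended excludes map
theorem pvB_inv (excludes : List (List (String × String))) (modules : List (String × List String))
    (em : PySem.Dict String String) (hnd : (modules.map Prod.fst).Nodup) :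
    (excludes.foldl (fun r mapping =>
      match (PySem.Dict.mk modules).get? ((PySem.Dict.mk mapping).getD "project" "") with
      | some ms => r.insert ((PySem.Dict.mk mapping).getD "project" "")
          (ms.filter (fun e => !(PySem.Str.isIn e ((PySem.Dict.mk mapping).getD "modules" ""))))
      | none    => r) (PySem.Dict.mk (modules.map (pvVal em)))).items
    = modules.map (pvVal (excludes.foldl (fun d mapping =>
        d.insert ((PySem.Dict.mk mapping).getD "project" "")
                 ((PySem.Dict.mk mapping).getD "modules" "")) em)) := by
  induction excludes generalizing em with
  | nil => rfl
  | cons mp rest ih =>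
    simp only [List.foldl_cons]
    generalize (PySem.Dict.mk mp).getD "project" "" = p
    generalize (PySem.Dict.mk mp).getD "modules" "" = s
    split
    case _ ms h =>
      have hfind : ∃ q ∈ modules, q.1 = p ∧ q.2 = ms := by
        have h' := h
        unfold PySem.Dict.get? at h'
        rcases Option.map_eq_some_iff.mp h' with ⟨q, hq, hq2⟩
        exact ⟨q, List.mem_of_find?_eq_some hq,
          by simpa using List.find?_some hq, hq2⟩
      rcases hfind with ⟨q, hqmem, hq1, hq2⟩
      have hcont : (PySem.Dict.mk (modules.map (pvVal em))).contains p = true := by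
        rw [PySem.Dict.contains_mk, List.any_eq_true]
        exact ⟨pvVal em q, List.mem_map_of_mem hqmem, by simp [pvVal_fst, hq1]⟩
      have hkeysnd : (PySem.Dict.mk modules).keys.Nodup := by
        simpa [PySem.Dict.keys] using hnd
      have hstep : (PySem.Dict.mk (modules.map (pvVal em))).insert p
            (ms.filter (fun e => !(PySem.Str.isIn e s)))
          = PySem.Dict.mk (modules.map (pvVal (em.insert p s))) := by
        have hitems : ((PySem.Dict.mk (modules.map (pvVal em))).insert p
              (ms.filter (fun e => !(PySem.Str.isIn e s)))).items
            = modules.map (pvVal (em.insert p s)) := by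
          rw [PySem.Dict.items_insert_of_contains _ _ hcont]
          show (modules.map (pvVal em)).map _ = _
          rw [List.map_map]
          refine List.map_congr_left (fun pm hpm => ?_)
          by_cases hpm1 : pm.1 = p
          · have hpm2 : pm.2 = ms := by
              have hg := PySem.Dict.get?_of_mem_items (PySem.Dict.mk modules)
                (by exact hpm) hkeysnd
              rw [hpm1, h] at hg
              exact (Option.some.injEq _ _ ▸ hg.symm : _)
            show (if ((pvVal em pm).1 == p) = true then (p, _) else _) = _
            rw [pvVal_fst, if_pos (by simp [hpm1])]
            unfold pvVal
            rw [hpm1, PySem.Dict.get?_insert_self, hpm2]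
          · show (if ((pvVal em pm).1 == p) = true then (p, _) else _) = _
            rw [pvVal_fst, if_neg (by simp [hpm1])]
            unfold pvVal
            rw [PySem.Dict.get?_insert_of_ne em _ hpm1]
        calc (PySem.Dict.mk (modules.map (pvVal em))).insert p
              (ms.filter (fun e => !(PySem.Str.isIn e s)))
            = PySem.Dict.mk (((PySem.Dict.mk (modules.map (pvVal em))).insert p
              (ms.filter (fun e => !(PySem.Str.isIn e s)))).items) := rfl
          _ = _ := by rw [hitems]
      rw [hstep]
      exact ih (em.insert p s)
    case _ h =>
      have hne : ∀ pm ∈ modules, pm.1 ≠ p := by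
        intro pm hpm heq
        have hc : (PySem.Dict.mk modules).contains p = false :=
          (PySem.Dict.get?_eq_none_iff_contains _ _).mp h
        rw [PySem.Dict.contains_mk] at hc
        rw [List.any_eq_false] at hc
        exact hc pm hpm (by simp [heq])
      have hmap : modules.map (pvVal em) = modules.map (pvVal (em.insert p s)) :=
        List.map_congr_left (fun pm hpm => by
          unfold pvVal
          rw [PySem.Dict.get?_insert_of_ne em _ (hne pm hpm)])
      rw [hmap]
      exact ih (em.insert p s)


-- ===== VERDICT (by name: the statement is the Claim_ definition above) =====
theorem exclude_modules_py_spec : Claim_equal_exclude_modules_py := by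
  intro modules excludes _ hpre
  unfold Spec_exclude_modules_py exclude_modules_py exclude_modules_py_alt
  have hB := pvB_inv excludes modules PySem.Dict.empty hpre.1
  simp only [List.map_congr_left (fun pm _ => pvVal_empty pm), List.map_id'] at hB
  rw [hB, pvA_char modules _ hpre.1]
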